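-- pv_equiv track=rewrite | github.com/jisngeorge/My-Python-code-practice | hopingstones.py | hop
-- ===== SOURCE A (Python) =====
-- def hop(a,N,i,fact,trippleHop_flag):
-- 	if(i>=N):
-- 		return 0
--
-- 	score = 0
-- 	if(i!=-1):
-- 		score = fact*a[i]
--
-- 	#Single Hop
-- 	singleHop = hop(a,N,i+1,1,trippleHop_flag)
--
-- 	#Double Hop
-- 	doubleHop = hop(a,N,i+2,2,trippleHop_flag)
--
-- 	#Tripple Hop
-- 	trippleHop = 0
--
-- 	if(trippleHop_flag==False):
-- 		trippleHop = hop(a,N,i+3,3,trippleHop_flag=True)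
--
-- 	greatest = max(singleHop, doubleHop, trippleHop)
--
-- 	total_score = score + greatest
--
-- 	return total_score
-- ===== SOURCE B (Python) =====
-- def hop(a, N, i, fact, trippleHop_flag):
--     if i >= N:
--         return 0
--     # Bottom-up DP over positions: FT[p] / FF[p] = best continuation score from
--     # position p when the triple hop has / has not been used yet.
--     FT = {}
--     FF = {}
--
--     def hv(p, k, F):
--         # value of landing at p with a k-hop, then continuing optimally per F
--         if p >= N:
--             return 0
--         return (k * a[p] if p != -1 else 0) + F.get(p, 0)
--
--     j = N - 1
--     while j >= i:
--         FT[j] = max(hv(j + 1, 1, FT), hv(j + 2, 2, FT), 0)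
--         FF[j] = max(hv(j + 1, 1, FF), hv(j + 2, 2, FF), hv(j + 3, 3, FT))
--         j -= 1
--
--     score = fact * a[i] if i != -1 else 0
--     return score + (FT[i] if trippleHop_flag else FF[i])
-- ===== Notes on version B (the rewrite author's own statement) =====
-- stated objective: alternative
-- what changed: replaced the 3-way branching recursion with a bottom-up DP loop that tabulates, for each position, the best continuation score with and without the triple hop still available
import Mathlib
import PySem

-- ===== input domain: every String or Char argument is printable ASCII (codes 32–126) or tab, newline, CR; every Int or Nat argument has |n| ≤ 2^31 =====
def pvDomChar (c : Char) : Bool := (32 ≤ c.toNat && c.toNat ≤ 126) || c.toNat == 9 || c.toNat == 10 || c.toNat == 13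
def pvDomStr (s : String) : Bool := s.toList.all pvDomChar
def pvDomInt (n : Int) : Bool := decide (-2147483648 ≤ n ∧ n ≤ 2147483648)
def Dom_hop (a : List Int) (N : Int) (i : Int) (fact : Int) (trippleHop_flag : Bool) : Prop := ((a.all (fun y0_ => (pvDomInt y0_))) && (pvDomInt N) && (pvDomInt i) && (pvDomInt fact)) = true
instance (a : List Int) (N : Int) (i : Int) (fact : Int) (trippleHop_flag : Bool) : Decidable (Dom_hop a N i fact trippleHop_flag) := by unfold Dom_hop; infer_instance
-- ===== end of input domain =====

-- B replaces A's 3-way branching recursion with a bottom-up DP loop over (position, triple-used) states; same return value on all of Pre_.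

-- ===== PORT A =====
def hop (a : List Int) (N : Int) (i : Int) (fact : Int) (trippleHop_flag : Bool) : Int :=
  if i ≥ N then 0
  else
    let score := if i ≠ -1 then fact * (PySem.List.pyGet? a i).getD 0 else 0
    let singleHop := hop a N (i+1) 1 trippleHop_flag
    let doubleHop := hop a N (i+2) 2 trippleHop_flag
    let trippleHop := if trippleHop_flag = false then hop a N (i+3) 3 true else 0
    score + max singleHop (max doubleHop trippleHop)
termination_by (N - i).toNat
decreasing_by all_goals omega

-- ===== PORT B =====
-- hv(p, k, F): value of landing at p with a k-hop, then continuing optimally per table F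
def hopAltHv (a : List Int) (N : Int) (p : Int) (k : Int) (F : PySem.Dict Int Int) : Int :=
  if p ≥ N then 0
  else (if p ≠ -1 then k * (PySem.List.pyGet? a p).getD 0 else 0) + F.getD p 0

-- the while loop 'j = N-1 … while j ≥ i', as structural recursion on the trip count
def hopAltLoop (a : List Int) (N : Int) (c : Nat) (j : Int) (FT FF : PySem.Dict Int Int) :
    PySem.Dict Int Int × PySem.Dict Int Int :=
  match c with
  | 0 => (FT, FF)
  | c+1 =>
    let ft := max (hopAltHv a N (j+1) 1 FT) (max (hopAltHv a N (j+2) 2 FT) 0)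
    let ff := max (hopAltHv a N (j+1) 1 FF) (max (hopAltHv a N (j+2) 2 FF) (hopAltHv a N (j+3) 3 FT))
    hopAltLoop a N c (j-1) (FT.insert j ft) (FF.insert j ff)

def hop_alt (a : List Int) (N : Int) (i : Int) (fact : Int) (trippleHop_flag : Bool) : Int :=
  if i ≥ N then 0
  else
    let r := hopAltLoop a N (N - i).toNat (N - 1) PySem.Dict.empty PySem.Dict.empty
    let score := if i ≠ -1 then fact * (PySem.List.pyGet? a i).getD 0 else 0
    score + (if trippleHop_flag then r.1.getD i 0 else r.2.getD i 0)

-- ===== PRECONDITION & SPEC =====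
-- Pre_ excludes exactly the inputs on which A raises IndexError: some visited index j in [i, N) other than -1 is out of range for a.
def Pre_hop (a : List Int) (N : Int) (i : Int) (fact : Int) (trippleHop_flag : Bool) : Prop :=
  N ≤ i ∨ (a = [] ∧ i = -1 ∧ N = 0) ∨ (a ≠ [] ∧ -(a.length : Int) ≤ i ∧ N ≤ (a.length : Int))
instance (a : List Int) (N : Int) (i : Int) (fact : Int) (trippleHop_flag : Bool) : Decidable (Pre_hop a N i fact trippleHop_flag) := by unfold Pre_hop; infer_instance
def pvWitness_hop : List Int × Int × Int × Int × Bool := ([3, -1, 4, 1], 4, 0, 1, false)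
def Spec_hop (a : List Int) (N : Int) (i : Int) (fact : Int) (trippleHop_flag : Bool) (out : Int) : Prop := out = hop_alt a N i fact trippleHop_flag
instance (a : List Int) (N : Int) (i : Int) (fact : Int) (trippleHop_flag : Bool) (out : Int) : Decidable (Spec_hop a N i fact trippleHop_flag out) := by unfold Spec_hop; infer_instance

-- ===== CLAIM (what is proved, stated in full; the proofs are below) =====
def Claim_equal_hop : Prop := ∀ (a : List Int) (N : Int) (i : Int) (fact : Int) (trippleHop_flag : Bool), Dom_hop a N i fact trippleHop_flag → Pre_hop a N i fact trippleHop_flag → Spec_hop a N i fact trippleHop_flag (hop a N i fact trippleHop_flag)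

-- ===== LEMMAS AND PROOFS =====

-- A's score term is additive: hop at (i, fact) is the score term plus hop at (i, 0).
theorem hop_split (a : List Int) (N i fact : Int) (flag : Bool) :
    hop a N i fact flag =
      (if i ≥ N then 0 else if i ≠ -1 then fact * (PySem.List.pyGet? a i).getD 0 else 0)
        + hop a N i 0 flag := by
  conv_lhs => rw [hop]
  conv_rhs => rw [hop]
  by_cases h : i ≥ N
  · simp [h]
  · simp only [if_neg h]
    by_cases h2 : i = -1 <;> simp [h2]

theorem hop_of_ge (a : List Int) (N i fact : Int) (flag : Bool) (h : i ≥ N) :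
    hop a N i fact flag = 0 := by
  rw [hop]; simp [h]

-- hv computes A's hop at (p, k, flag) when the table F agrees with hop at (·, 0, flag) above j.
theorem hv_eq (a : List Int) (N j : Int) (flag : Bool) (F : PySem.Dict Int Int)
    (hF : ∀ q, j < q → F.getD q 0 = hop a N q 0 flag)
    (p k : Int) (hp : j < p) :
    hopAltHv a N p k F = hop a N p k flag := by
  unfold hopAltHv
  by_cases h : p ≥ N
  · rw [hop_of_ge a N p k flag h]; simp [h]
  · rw [hop_split a N p k flag, hF p hp]
    simp [h]

-- unfolding hop at (j, 0, flag): the "greatest" part only, score term is 0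
theorem hop_zero_unfold (a : List Int) (N j : Int) (flag : Bool) (h : ¬ j ≥ N) :
    hop a N j 0 flag =
      max (hop a N (j+1) 1 flag)
        (max (hop a N (j+2) 2 flag)
          (if flag = false then hop a N (j+3) 3 true else 0)) := by
  conv_lhs => rw [hop]
  rw [if_neg h]
  by_cases h2 : j = -1 <;> simp [h2]

theorem loop_inv (a : List Int) (N : Int) :
    ∀ (c : Nat) (j : Int) (FT FF : PySem.Dict Int Int),
      (∀ p, j < p → FT.getD p 0 = hop a N p 0 true) →
      (∀ p, j < p → FF.getD p 0 = hop a N p 0 false) →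
      ∀ p, j - c < p →
        (hopAltLoop a N c j FT FF).1.getD p 0 = hop a N p 0 true ∧
        (hopAltLoop a N c j FT FF).2.getD p 0 = hop a N p 0 false := by
  intro c
  induction c with
  | zero =>
    intro j FT FF hT hF p hp
    simp only [hopAltLoop]
    exact ⟨hT p (by omega), hF p (by omega)⟩
  | succ c ih =>
    intro j FT FF hT hF p hp
    simp only [hopAltLoop]
    have hft : max (hopAltHv a N (j+1) 1 FT) (max (hopAltHv a N (j+2) 2 FT) 0)
        = hop a N j 0 true := by
      by_cases h : j ≥ N
      · rw [hop_of_ge a N j 0 true h]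
        rw [hv_eq a N j true FT hT (j+1) 1 (by omega), hv_eq a N j true FT hT (j+2) 2 (by omega)]
        rw [hop_of_ge a N (j+1) 1 true (by omega), hop_of_ge a N (j+2) 2 true (by omega)]
        simp
      · rw [hop_zero_unfold a N j true h]
        rw [hv_eq a N j true FT hT (j+1) 1 (by omega), hv_eq a N j true FT hT (j+2) 2 (by omega)]
        simp
    have hff : max (hopAltHv a N (j+1) 1 FF) (max (hopAltHv a N (j+2) 2 FF) (hopAltHv a N (j+3) 3 FT))
        = hop a N j 0 false := by
      rw [hv_eq a N j false FF hF (j+1) 1 (by omega), hv_eq a N j false FF hF (j+2) 2 (by omega),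
          hv_eq a N j true FT hT (j+3) 3 (by omega)]
      by_cases h : j ≥ N
      · rw [hop_of_ge a N j 0 false h]
        rw [hop_of_ge a N (j+1) 1 false (by omega), hop_of_ge a N (j+2) 2 false (by omega),
            hop_of_ge a N (j+3) 3 true (by omega)]
        simp
      · rw [hop_zero_unfold a N j false h]
        simp
    apply ih (j-1)
    · intro q hq
      rw [PySem.Dict.getD_insert]
      by_cases hqj : q = j
      · subst hqj; simp [hft]
      · rw [if_neg hqj]; exact hT q (by omega)
    · intro q hq
      rw [PySem.Dict.getD_insert]
      by_cases hqj : q = j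
      · subst hqj; simp [hff]
      · rw [if_neg hqj]; exact hF q (by omega)
    · omega

-- ===== VERDICT (by name: the statement is the Claim_ definition above) =====
theorem hop_spec : Claim_equal_hop := by
  intro a N i fact flag _hdom _hpre
  unfold Spec_hop hop_alt
  by_cases h : i ≥ N
  · simp only [if_pos h]
    exact hop_of_ge a N i fact flag h
  · simp only [if_neg h]
    have hinv := loop_inv a N (N - i).toNat (N - 1) PySem.Dict.empty PySem.Dict.empty
      (fun p hp => by rw [PySem.Dict.getD_empty, hop_of_ge a N p 0 true (by omega)])
      (fun p hp => by rw [PySem.Dict.getD_empty, hop_of_ge a N p 0 false (by omega)])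
      i (by omega)
    rw [hop_split a N i fact flag]
    cases flag with
    | true => simp only [if_neg h, if_pos]; rw [hinv.1]
    | false => simp only [if_neg h]; rw [← hinv.2]; simp
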